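-- pv_equiv track=rewrite | github.com/albancolley/aoc | aoc2016/21/task.py | rotate_based
-- ===== SOURCE A (Python) =====
-- def rotate_based(password, pos):
--     steps = int(password.index(pos))
--     if steps >= 4:
--         steps += 1
--     steps += 1
--     new_password = password.copy()
--     for i in range(len(password)):
--         new_password[(i + steps) % len(password)] = password[i]
--     password = new_password
--     return password
-- ===== SOURCE B (Python) =====
-- def rotate_based(password, pos):
--     steps = password.index(pos) + 1
--     if steps >= 5:
--         steps += 1
--     rotated = list(password)
--     for _ in range(steps % len(rotated)):
--         rotated.insert(0, rotated.pop())
--     return rotated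
-- ===== Notes on version B (the rewrite author's own statement) =====
-- stated objective: alternative
-- what changed: Replaces A's per-element modular placement loop new_password[(i+steps)%n]=password[i] with repeating a single rotate-right step (pop the last element and reinsert it at the front) steps%n times.
import Mathlib
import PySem

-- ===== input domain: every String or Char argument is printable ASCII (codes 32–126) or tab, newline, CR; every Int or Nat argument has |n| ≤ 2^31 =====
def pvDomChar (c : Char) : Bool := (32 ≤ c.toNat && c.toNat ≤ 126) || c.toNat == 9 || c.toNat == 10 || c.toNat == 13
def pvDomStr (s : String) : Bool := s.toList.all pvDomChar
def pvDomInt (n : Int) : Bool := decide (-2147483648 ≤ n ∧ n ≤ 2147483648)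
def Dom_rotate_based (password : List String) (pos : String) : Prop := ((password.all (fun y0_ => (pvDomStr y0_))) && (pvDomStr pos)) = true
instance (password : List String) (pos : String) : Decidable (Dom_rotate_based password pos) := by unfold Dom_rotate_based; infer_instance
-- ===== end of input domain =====

-- B replaces A's per-element modular placement loop with repeating a single
-- rotate-right step (pop the last element, reinsert it at the front) steps % n times.

-- ===== PORT A =====
def rotate_based (password : List String) (pos : String) : List String :=
  match PySem.List.index? password pos with
  | none => []   -- password.index(pos) raises ValueError; excluded by Pre_
  | some idx =>
    let steps : Int := (idx : Int)
    let steps : Int := if steps ≥ 4 then steps + 1 else steps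
    let steps : Int := steps + 1
    -- for i in range(len(password)): new_password[(i+steps)%len(password)] = password[i]
    (PySem.List.pyRange 0 (password.length : Int) 1).foldl
      (fun np i =>
        np.set (PySem.Int.mod (i + steps) (password.length : Int)).toNat
          (PySem.List.pyGetD password i ""))
      password

-- ===== PORT B =====
-- rotated.insert(0, rotated.pop()): one rotate-right step
def pvRotOne (l : List String) : List String :=
  match PySem.List.pop? l (-1) with
  | some (x, rest) => PySem.List.insert rest 0 x
  | none => l   -- rotated.pop() on an empty list; unreachable under Pre_

def rotate_based_alt (password : List String) (pos : String) : List String :=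
  match PySem.List.index? password pos with
  | none => []   -- password.index(pos) raises ValueError; excluded by Pre_
  | some idx =>
    let steps : Int := (idx : Int) + 1
    let steps : Int := if steps ≥ 5 then steps + 1 else steps
    let cnt : Int := PySem.Int.mod steps (password.length : Int)
    (List.range cnt.toNat).foldl (fun acc _ => pvRotOne acc) password

-- ===== PRECONDITION & SPEC =====
-- Pre_ excludes exactly the inputs where password.index(pos) raises ValueError (pos not in password).
def Pre_rotate_based (password : List String) (pos : String) : Prop := pos ∈ password
instance (password : List String) (pos : String) : Decidable (Pre_rotate_based password pos) := by unfold Pre_rotate_based; infer_instance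
def pvWitness_rotate_based : List String × String := (["a", "b", "c"], "b")

def Spec_rotate_based (password : List String) (pos : String) (out : List String) : Prop := out = rotate_based_alt password pos
instance (password : List String) (pos : String) (out : List String) : Decidable (Spec_rotate_based password pos out) := by unfold Spec_rotate_based; infer_instance

-- ===== CLAIM (what is proved, stated in full; the proofs are below) =====
def Claim_equal_rotate_based : Prop := ∀ (password : List String) (pos : String), Dom_rotate_based password pos → Pre_rotate_based password pos → Spec_rotate_based password pos (rotate_based password pos)

-- ===== LEMMAS AND PROOFS =====

-- the placement loop preserves length
theorem rot_len (pw : List String) (s' : Nat) :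
    ∀ (m : Nat) (init : List String),
      ((List.range m).foldl (fun acc k => acc.set ((k + s') % pw.length) (pw.getD k "")) init).length
        = init.length := by
  intro m
  induction m with
  | zero => intro init; rfl
  | succ m ih =>
      intro init
      rw [List.range_succ, List.foldl_append, List.foldl_cons, List.foldl_nil,
        List.length_set]
      exact ih init

theorem mod_fwd (n s' m : Nat) (hs : s' ≤ n) (hm : m < n) :
    ((m + s') % n + n - s') % n = m := by
  have h1 : (m + s') % n + n - s' = (m + s') % n + (n - s') := by omega
  rw [h1, Nat.mod_add_mod]
  have h2 : m + s' + (n - s') = m + n := by omega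
  rw [h2, Nat.add_mod_right, Nat.mod_eq_of_lt hm]

theorem mod_inv (n s' j : Nat) (hs : s' ≤ n) (hj : j < n) :
    ((j + n - s') % n + s') % n = j := by
  rw [Nat.mod_add_mod]
  have h : j + n - s' + s' = j + n := by omega
  rw [h, Nat.add_mod_right, Nat.mod_eq_of_lt hj]

-- characterisation of the placement loop: after m iterations, position j holds pw[(j+n-s')%n]
-- if that source index was already processed, else the initial entry
theorem rot_get (pw : List String) (s' : Nat) (hs : s' < pw.length) :
    ∀ (m : Nat), m ≤ pw.length → ∀ (init : List String), init.length = pw.length →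
      ∀ j, j < pw.length →
      ((List.range m).foldl (fun acc k => acc.set ((k + s') % pw.length) (pw.getD k "")) init)[j]?
        = if (j + pw.length - s') % pw.length < m
          then pw[(j + pw.length - s') % pw.length]? else init[j]? := by
  intro m
  induction m with
  | zero => intro _ init _ j _; simp
  | succ m ih =>
      intro hm init hinit j hj
      have hn : 0 < pw.length := by omega
      rw [List.range_succ, List.foldl_append, List.foldl_cons, List.foldl_nil]
      by_cases hcase : (m + s') % pw.length = j
      · have hlen : (m + s') % pw.length <
            ((List.range m).foldl (fun acc k => acc.set ((k + s') % pw.length) (pw.getD k "")) init).length := by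
          rw [rot_len, hinit]; exact Nat.mod_lt _ hn
        rw [← hcase, List.getElem?_set_self hlen]
        have hi0 : ((m + s') % pw.length + pw.length - s') % pw.length = m :=
          mod_fwd pw.length s' m (by omega) (by omega)
        rw [hi0, if_pos (by omega), List.getD_eq_getElem pw "" (by omega),
          List.getElem?_eq_getElem (by omega)]
      · rw [List.getElem?_set_ne hcase, ih (by omega) init hinit j hj]
        have hne : (j + pw.length - s') % pw.length ≠ m := by
          intro h
          apply hcase
          have := mod_inv pw.length s' j (by omega) hj
          rw [h] at this
          omega
        by_cases hlt : (j + pw.length - s') % pw.length < m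
        · rw [if_pos hlt, if_pos (by omega)]
        · rw [if_neg hlt, if_neg (by omega)]

-- A's loop computes the right-rotation by s' in closed form
theorem loop_eq_rot (pw : List String) (s' : Nat) (hs : s' < pw.length) :
    (List.range pw.length).foldl
        (fun acc k => acc.set ((k + s') % pw.length) (pw.getD k "")) pw
      = pw.drop (pw.length - s') ++ pw.take (pw.length - s') := by
  have hn : 0 < pw.length := by omega
  apply List.ext_getElem?
  intro j
  have hdropLen : (List.drop (pw.length - s') pw).length = s' := by
    rw [List.length_drop]; omega
  by_cases hj : j < pw.length
  · rw [rot_get pw s' hs pw.length le_rfl pw rfl j hj,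
      if_pos (Nat.mod_lt _ hn), List.getElem?_append, hdropLen]
    by_cases hjs : j < s'
    · rw [if_pos hjs, List.getElem?_drop]
      have : (j + pw.length - s') % pw.length = pw.length - s' + j := by
        rw [Nat.mod_eq_of_lt (by omega)]; omega
      rw [this]
    · rw [if_neg hjs, List.getElem?_take, if_pos (by omega)]
      have : (j + pw.length - s') % pw.length = j - s' := by
        have h : j + pw.length - s' = (j - s') + pw.length := by omega
        rw [h, Nat.add_mod_right, Nat.mod_eq_of_lt (by omega)]
      rw [this]
  · rw [List.getElem?_eq_none (by rw [rot_len]; omega),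
      List.getElem?_eq_none (by simp; omega)]

-- one rotate-right step on a rotated-by-m list rotates by m+1
set_option maxRecDepth 4000 in
theorem rotOne_step (pw : List String) (k : Nat) (hk1 : 1 ≤ k) (hk : k ≤ pw.length) :
    pvRotOne (pw.drop k ++ pw.take k) = pw.drop (k - 1) ++ pw.take (k - 1) := by
  obtain ⟨k', rfl⟩ : ∃ k', k = k' + 1 := ⟨k - 1, by omega⟩
  have hkpw : k' < pw.length := by omega
  have htake : pw.take (k' + 1) = pw.take k' ++ [pw[k']] := by
    rw [List.take_add_one, List.getElem?_eq_getElem hkpw]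
    rfl
  have hdrop : pw.drop k' = pw[k'] :: pw.drop (k' + 1) := List.drop_eq_getElem_cons hkpw
  unfold pvRotOne
  rw [htake, ← List.append_assoc, PySem.List.pop?_last]
  show PySem.List.insert (pw.drop (k' + 1) ++ pw.take k') 0 pw[k'] = _
  rw [PySem.List.insert_zero, Nat.add_sub_cancel, hdrop, List.cons_append]

-- iterating pvRotOne m times rotates right by m
theorem iter_rotOne (pw : List String) :
    ∀ (m : Nat), m ≤ pw.length →
      (List.range m).foldl (fun acc _ => pvRotOne acc) pw
        = pw.drop (pw.length - m) ++ pw.take (pw.length - m) := by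
  intro m
  induction m with
  | zero => simp
  | succ m ih =>
      intro hm
      rw [List.range_succ, List.foldl_append, List.foldl_cons, List.foldl_nil,
        ih (by omega), rotOne_step pw (pw.length - m) (by omega) (by omega)]
      have : pw.length - m - 1 = pw.length - (m + 1) := by omega
      rw [this]

-- ===== VERDICT (by name: the statement is the Claim_ definition above) =====
theorem rotate_based_spec : Claim_equal_rotate_based := by
  intro password pos _ hpre
  unfold Spec_rotate_based rotate_based rotate_based_alt
  obtain ⟨k, hk⟩ := Option.isSome_iff_exists.mp ((PySem.List.index?_isSome_iff password pos).mpr hpre)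
  obtain ⟨hklt, -, -⟩ := PySem.List.getElem_of_index?_eq_some hk
  rw [hk]
  simp only []
  have hn : 0 < password.length := by omega
  have hnI : (0:Int) < (password.length : Int) := by exact_mod_cast hn
  -- the two step counts agree
  have hSS : ((if (k:Int) ≥ 4 then (k:Int) + 1 else (k:Int)) + 1)
      = (if (k:Int) + 1 ≥ 5 then (k:Int) + 1 + 1 else (k:Int) + 1) := by
    split_ifs <;> omega
  rw [← hSS]
  set S : Int := (if (k:Int) ≥ 4 then (k:Int) + 1 else (k:Int)) + 1 with hSdef
  rw [PySem.Int.mod_eq_emod_of_pos hnI]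
  set s' : Nat := (S % (password.length : Int)).toNat with hs'def
  have hs0 : 0 ≤ S % (password.length : Int) := Int.emod_nonneg _ (by omega)
  have hslt : S % (password.length : Int) < (password.length : Int) := Int.emod_lt_of_pos _ hnI
  have hs'lt : s' < password.length := by omega
  -- A side: the Int loop is the Nat placement loop
  rw [PySem.List.pyRange_one, List.foldl_map]
  have hrange : (((password.length : Int)) - 0).toNat = password.length := by omega
  rw [hrange]
  rw [PySem.List.foldl_congr_mem (List.range password.length) _
      (fun acc k => acc.set ((k + s') % password.length) (password.getD k "")) password
      (by
        intro acc i hi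
        have hiLt : i < password.length := List.mem_range.mp hi
        have hidx : (PySem.Int.mod (0 + (i:Int) + S) (password.length : Int)).toNat
            = (i + s') % password.length := by
          rw [PySem.Int.mod_eq_emod_of_pos hnI, zero_add]
          have h1 : ((i:Int) + S) % (password.length : Int)
              = (((i + s') % password.length : Nat) : Int) := by
            calc ((i:Int) + S) % (password.length : Int)
                = ((i:Int) % (password.length : Int) + S % (password.length : Int))
                    % (password.length : Int) := Int.add_emod _ _ _
              _ = ((i:Int) % (password.length : Int) + (s' : Int)) % (password.length : Int) := by
                    rw [hs'def]; rw [Int.toNat_of_nonneg hs0]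
              _ = ((i:Int) + (s' : Int)) % (password.length : Int) := Int.emod_add_emod _ _ _
              _ = (((i + s') % password.length : Nat) : Int) := by push_cast; ring_nf
          rw [h1]
          omega
        rw [hidx, zero_add, PySem.List.pyGetD_natCast])]
  rw [loop_eq_rot password s' hs'lt, iter_rotOne password s' (by omega)]
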